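-- pv_equiv track=rewrite | github.com/milahu/z3gi | z3gi/utils.py | determinize
-- ===== SOURCE A (Python) =====
-- def determinize(seq):
--     neat = {}
--     neat[None] = None
--     i = 0
--     for (label, value) in seq:
--         if value not in neat:
--             neat[value] = i
--             i = i + 1
--     return [(label, neat[value]) for label, value in seq]
-- ===== SOURCE B (Python) =====
-- def determinize(seq):
--     # Closed-form, table-free: the canonical id of a value is the number of
--     # distinct non-None values occurring strictly before its first occurrence.
--     # Each id is computed independently from the value sequence; no running
--     # dict/counter is maintained.
--     vals = [v for _, v in seq]
--
--     def ident(v):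
--         if v is None:
--             return None
--         j = vals.index(v)  # position of the first occurrence
--         return len({u for u in vals[:j] if u is not None})
--
--     return [(label, ident(v)) for label, v in seq]
-- ===== Notes on version B (the rewrite author's own statement) =====
-- stated objective: alternative
-- what changed: A maintains a running dict and counter in one loop and then re-scans the sequence looking ids up; B keeps no table at all and computes each id by a closed-form count: the id of value v is the number of distinct non-None values occurring strictly before v's first occurrence, found per element with vals.index and a set comprehension.
import Mathlib
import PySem

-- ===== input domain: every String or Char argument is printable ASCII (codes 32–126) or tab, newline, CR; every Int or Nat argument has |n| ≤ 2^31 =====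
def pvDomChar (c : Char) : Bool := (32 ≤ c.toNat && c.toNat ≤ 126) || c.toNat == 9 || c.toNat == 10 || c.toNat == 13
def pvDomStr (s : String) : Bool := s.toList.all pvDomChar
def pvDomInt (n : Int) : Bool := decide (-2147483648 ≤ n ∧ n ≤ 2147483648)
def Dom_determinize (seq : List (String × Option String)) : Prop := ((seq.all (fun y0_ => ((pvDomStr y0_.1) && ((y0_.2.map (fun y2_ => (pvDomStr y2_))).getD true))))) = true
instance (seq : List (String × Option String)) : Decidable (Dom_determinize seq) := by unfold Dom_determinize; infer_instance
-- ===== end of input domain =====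

-- B replaces A's running dict+counter with a table-free closed form: each id is
-- independently computed as the count of distinct non-None values before the
-- value's first occurrence (alternative algorithm, not faster).


-- ===== PORT A =====
-- the loop body: 'if value not in neat: neat[value] = i; i = i + 1'
def detStepA (st : PySem.Dict (Option String) (Option Int) × Int)
    (p : String × Option String) : PySem.Dict (Option String) (Option Int) × Int :=
  if st.1.contains p.2 then st else (st.1.insert p.2 (some st.2), st.2 + 1)

def determinize (seq : List (String × Option String)) : List (String × Option Int) :=
  -- neat = {}; neat[None] = None; i = 0; for (label, value) in seq: …
  let st := seq.foldl detStepA ((PySem.Dict.empty.insert none none), 0)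
  -- [(label, neat[value]) for label, value in seq]  (neat[value] always present: every
  -- value was inserted by the loop; getD's default is never reached)
  seq.map (fun p => (p.1, (st.1.get? p.2).getD none))

-- ===== PORT B =====
-- ident(v): None ↦ None; else the count of distinct non-None values before v's
-- first occurrence (vals.index(v) always succeeds: v is drawn from vals, so
-- getD's default 0 is never reached; vals[:j] = take j exactly, as 0 ≤ j).
def detIdent (vals : List (Option String)) (v : Option String) : Option Int :=
  match v with
  | none => none
  | some s =>
    let j := (PySem.List.index? vals (some s)).getD 0
    some (((PySem.Set.ofList ((vals.take j).filter Option.isSome)).length : Int))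

def determinize_alt (seq : List (String × Option String)) : List (String × Option Int) :=
  let vals := seq.map (fun p => p.2)
  seq.map (fun p => (p.1, detIdent vals p.2))

-- ===== PRECONDITION & SPEC =====
def Spec_determinize (seq : List (String × Option String)) (out : List (String × Option Int)) : Prop := out = determinize_alt seq
instance (seq : List (String × Option String)) (out : List (String × Option Int)) : Decidable (Spec_determinize seq out) := by unfold Spec_determinize; infer_instance

-- ===== CLAIM (what is proved, stated in full; the proofs are below) =====
def Claim_equal_determinize : Prop := ∀ (seq : List (String × Option String)), Dom_determinize seq → Spec_determinize seq (determinize seq)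

-- ===== LEMMAS AND PROOFS =====

-- number of distinct non-None values in pre
def detDnn (pre : List (Option String)) : Nat :=
  (PySem.Set.ofList (pre.filter Option.isSome)).length

-- invariant of A's loop: state (neat, i) after processing the values 'pre'
def DetInv (neat : PySem.Dict (Option String) (Option Int)) (i : Int)
    (pre : List (Option String)) : Prop :=
  neat.get? none = some none ∧
  (∀ s : String, neat.get? (some s) =
      if some s ∈ pre then some (detIdent pre (some s)) else none) ∧
  i = (detDnn pre : Int)

theorem detIdent_append (pre more : List (Option String)) (s : String)
    (h : some s ∈ pre) : detIdent (pre ++ more) (some s) = detIdent pre (some s) := by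
  obtain ⟨k, hk⟩ := Option.isSome_iff_exists.mp
    ((PySem.List.index?_isSome_iff pre (some s)).mpr h)
  have hle : k ≤ pre.length := by
    obtain ⟨hk', _, _⟩ := PySem.List.getElem_of_index?_eq_some hk
    omega
  simp only [detIdent]
  rw [PySem.List.index?_append_of_mem more h, hk, Option.getD_some,
    List.take_append_of_le_length hle]

theorem detDnn_append_none (pre : List (Option String)) :
    detDnn (pre ++ [none]) = detDnn pre := by
  simp [detDnn]

theorem detDnn_append_mem (pre : List (Option String)) (s : String)
    (h : some s ∈ pre) : detDnn (pre ++ [some s]) = detDnn pre := by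
  have : some s ∈ pre.filter Option.isSome := List.mem_filter.mpr ⟨h, rfl⟩
  simp [detDnn, PySem.Set.ofList_append_singleton, PySem.Set.add,
    PySem.Set.contains, h]

theorem detDnn_append_new (pre : List (Option String)) (s : String)
    (h : some s ∉ pre) : detDnn (pre ++ [some s]) = detDnn pre + 1 := by
  have : some s ∉ pre.filter Option.isSome := fun hc => h (List.mem_filter.mp hc).1
  simp [detDnn, PySem.Set.ofList_append_singleton, PySem.Set.add,
    PySem.Set.contains, h]

theorem detIdent_append_new (pre : List (Option String)) (s : String)
    (h : some s ∉ pre) :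
    detIdent (pre ++ [some s]) (some s) = some (detDnn pre : Int) := by
  simp only [detIdent]
  rw [PySem.List.index?_append_singleton_self pre (some s) h, Option.getD_some,
    List.take_append_of_le_length (Nat.le_refl pre.length), List.take_length]
  rfl

theorem detInv_step (neat : PySem.Dict (Option String) (Option Int)) (i : Int)
    (pre : List (Option String)) (hInv : DetInv neat i pre)
    (p : String × Option String) :
    DetInv (detStepA (neat, i) p).1 (detStepA (neat, i) p).2 (pre ++ [p.2]) := by
  obtain ⟨hn, hs, hi⟩ := hInv
  obtain ⟨label, value⟩ := p
  cases value with
  | none =>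
    have hstep : detStepA (neat, i) (label, none) = (neat, i) := by
      unfold detStepA
      rw [PySem.Dict.contains_eq_isSome_get?]
      simp [hn]
    rw [hstep]
    refine ⟨hn, ?_, ?_⟩
    · intro s
      rw [hs s]
      by_cases hm : some s ∈ pre
      · simp [hm, detIdent_append pre [none] s hm]
      · simp [hm]
    · rw [hi, detDnn_append_none]
  | some v =>
    by_cases hm : some v ∈ pre
    · have hc : neat.contains (some v) = true := by
        rw [PySem.Dict.contains_eq_isSome_get?, hs v]
        simp [hm]
      have hstep : detStepA (neat, i) (label, some v) = (neat, i) := by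
        unfold detStepA; simp [hc]
      rw [hstep]
      refine ⟨hn, ?_, ?_⟩
      · intro s
        rw [hs s]
        by_cases hm' : some s ∈ pre
        · simp [hm', detIdent_append pre [some v] s hm']
        · have : some s ∉ pre ++ [some v] := by
            simp [hm']
            intro he; exact hm' (he ▸ hm)
          simp [hm', this]
      · rw [hi, detDnn_append_mem pre v hm]
    · have hc : neat.contains (some v) = false := by
        rw [PySem.Dict.contains_eq_isSome_get?, hs v]
        simp [hm]
      have hstep : detStepA (neat, i) (label, some v)
          = (neat.insert (some v) (some i), i + 1) := by
        unfold detStepA; simp [hc]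
      rw [hstep]
      refine ⟨?_, ?_, ?_⟩
      · rw [PySem.Dict.get?_insert_of_ne _ _ (by simp)]; exact hn
      · intro s
        by_cases he : s = v
        · subst he
          rw [PySem.Dict.get?_insert_self]
          simp [detIdent_append_new pre s hm, hi]
        · rw [PySem.Dict.get?_insert_of_ne _ _ (by simp [he]), hs s]
          by_cases hm' : some s ∈ pre
          · simp [hm', detIdent_append pre [some v] s hm']
          · have : some s ∉ pre ++ [some v] := by simp [hm', he]
            simp [hm', this]
      · rw [hi, detDnn_append_new pre v hm]; push_cast; ring

theorem detInv_fold (rem : List (String × Option String))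
    (neat : PySem.Dict (Option String) (Option Int)) (i : Int)
    (pre : List (Option String)) (hInv : DetInv neat i pre) :
    DetInv (rem.foldl detStepA (neat, i)).1 (rem.foldl detStepA (neat, i)).2
      (pre ++ rem.map (fun p => p.2)) := by
  induction rem generalizing neat i pre with
  | nil => simpa using hInv
  | cons p rest ih =>
    have h := ih (detStepA (neat, i) p).1 (detStepA (neat, i) p).2 (pre ++ [p.2])
      (detInv_step neat i pre hInv p)
    simpa [List.foldl_cons] using h

-- ===== VERDICT (by name: the statement is the Claim_ definition above) =====
theorem determinize_spec : Claim_equal_determinize := by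
  intro seq _
  show determinize seq = determinize_alt seq
  have hInv0 : DetInv (PySem.Dict.empty.insert none none) 0 [] := by
    refine ⟨PySem.Dict.get?_insert_self _ _ _, ?_, rfl⟩
    intro s
    rw [PySem.Dict.get?_insert_of_ne _ _ (by simp)]
    simp [PySem.Dict.get?_empty]
  have hInv := detInv_fold seq _ 0 [] hInv0
  simp only [List.nil_append] at hInv
  obtain ⟨hn, hs, _⟩ := hInv
  unfold determinize determinize_alt
  apply List.map_congr_left
  intro p hp
  obtain ⟨label, value⟩ := p
  cases value with
  | none => simp [hn, detIdent]
  | some v =>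
    have hm : some v ∈ seq.map (fun p => p.2) :=
      List.mem_map.mpr ⟨(label, some v), hp, rfl⟩
    simp [hs v, hm]
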